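-- pv_equiv track=rewrite | github.com/jonathonreilly/toy-physics | scripts/plaquette_surface_common.py | support_box
-- ===== SOURCE A (Python) =====
-- DIMS = 4
--
-- Cell = tuple[tuple[int, int, int, int], tuple[int, int, int]]
--
-- def support_box(cells: frozenset[Cell] | tuple[Cell, ...] | set[Cell], pad: int = 0) -> tuple[tuple[int, int], ...]:
--     anchors = [cell[0] for cell in cells]
--     bounds: list[tuple[int, int]] = []
--     for axis in range(DIMS):
--         lo = min(anchor[axis] for anchor in anchors) - 1 - pad
--         hi = max(anchor[axis] for anchor in anchors) + pad
--         bounds.append((lo, hi))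
--     return tuple(bounds)
-- ===== SOURCE B (Python) =====
-- DIMS = 4
--
-- def support_box(cells, pad=0):
--     it = iter(cells)
--     try:
--         first_anchor, _ = next(it)
--     except StopIteration:
--         raise ValueError("support_box() requires at least one cell")
--     lo = list(first_anchor)
--     hi = list(first_anchor)
--     for anchor, _ in it:
--         for i in range(DIMS):
--             v = anchor[i]
--             if v < lo[i]:
--                 lo[i] = v
--             if v > hi[i]:
--                 hi[i] = v
--     return tuple((l - 1 - pad, h + pad) for l, h in zip(lo, hi))
-- ===== Notes on version B (the rewrite author's own statement) =====
-- stated objective: alternative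
-- what changed: One pass over the cells maintaining per-axis running minima and maxima seeded from the first anchor, instead of four separate min()/max() generator scans per axis.
-- outside the precondition, e.g. on support_box([], 0): A raises ValueError, B raises ValueError
import Mathlib
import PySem

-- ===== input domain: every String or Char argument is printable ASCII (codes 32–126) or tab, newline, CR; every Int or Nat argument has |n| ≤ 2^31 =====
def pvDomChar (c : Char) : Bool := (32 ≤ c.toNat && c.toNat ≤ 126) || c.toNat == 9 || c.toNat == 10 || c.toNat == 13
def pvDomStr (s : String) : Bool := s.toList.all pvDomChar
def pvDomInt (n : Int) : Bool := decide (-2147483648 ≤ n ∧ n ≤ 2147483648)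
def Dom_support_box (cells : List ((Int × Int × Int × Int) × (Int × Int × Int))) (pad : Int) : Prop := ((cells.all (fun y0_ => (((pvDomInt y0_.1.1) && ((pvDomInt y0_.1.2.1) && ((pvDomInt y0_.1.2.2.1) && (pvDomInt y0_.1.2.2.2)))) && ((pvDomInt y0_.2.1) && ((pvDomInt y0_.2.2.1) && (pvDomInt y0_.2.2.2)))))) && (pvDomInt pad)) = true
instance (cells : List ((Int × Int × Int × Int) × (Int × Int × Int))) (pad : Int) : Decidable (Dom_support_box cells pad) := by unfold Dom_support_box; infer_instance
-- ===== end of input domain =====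

-- B replaces A's four per-axis min()/max() generator scans by one pass keeping running
-- per-axis minima and maxima seeded from the first anchor (objective: alternative).

-- ===== PORT A =====
-- anchor[axis] for axis in range(4)
def pvAxisGet (a : Int × Int × Int × Int) (axis : Nat) : Int :=
  match axis with
  | 0 => a.1
  | 1 => a.2.1
  | 2 => a.2.2.1
  | _ => a.2.2.2

def support_box (cells : List ((Int × Int × Int × Int) × (Int × Int × Int))) (pad : Int) : List (Int × Int) :=
  let anchors := cells.map (fun cell => cell.1)
  -- for axis in range(DIMS): min()/max() over a generator; ValueError on empty is
  -- excluded by Pre_, so .getD 0 on the Option is never the value used.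
  (List.range 4).foldl (fun bounds axis =>
    let lo := ((anchors.map (fun anchor => pvAxisGet anchor axis)).min?).getD 0 - 1 - pad
    let hi := ((anchors.map (fun anchor => pvAxisGet anchor axis)).max?).getD 0 + pad
    bounds ++ [(lo, hi)]) []

-- ===== PORT B =====
-- inner loop body of Source B: fold one cell into the (lo, hi) state, axis by axis
def pvStep (s : (Int × Int × Int × Int) × (Int × Int × Int × Int))
    (c : (Int × Int × Int × Int) × (Int × Int × Int)) :
    (Int × Int × Int × Int) × (Int × Int × Int × Int) :=
  let b := c.1
  ((min s.1.1 b.1, min s.1.2.1 b.2.1, min s.1.2.2.1 b.2.2.1, min s.1.2.2.2 b.2.2.2),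
   (max s.2.1 b.1, max s.2.2.1 b.2.1, max s.2.2.2.1 b.2.2.1, max s.2.2.2.2 b.2.2.2))

def support_box_alt (cells : List ((Int × Int × Int × Int) × (Int × Int × Int))) (pad : Int) : List (Int × Int) :=
  match cells with
  | [] => []   -- Source B raises ValueError here; excluded by Pre_
  | c :: rest =>
    let s := rest.foldl pvStep (c.1, c.1)
    [(s.1.1 - 1 - pad, s.2.1 + pad),
     (s.1.2.1 - 1 - pad, s.2.2.1 + pad),
     (s.1.2.2.1 - 1 - pad, s.2.2.2.1 + pad),
     (s.1.2.2.2 - 1 - pad, s.2.2.2.2 + pad)]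

-- ===== PRECONDITION & SPEC =====
-- A's min()/max() over an empty sequence raise ValueError (and Source B raises ValueError too):
-- the empty list is excluded.
def Pre_support_box (cells : List ((Int × Int × Int × Int) × (Int × Int × Int))) (pad : Int) : Prop :=
  cells ≠ []
instance (cells : List ((Int × Int × Int × Int) × (Int × Int × Int))) (pad : Int) : Decidable (Pre_support_box cells pad) := by unfold Pre_support_box; infer_instance

def pvWitness_support_box : (List ((Int × Int × Int × Int) × (Int × Int × Int))) × Int :=
  ([((0, 1, 2, 3), (0, 0, 0)), ((4, -1, 0, 2), (1, 0, 0))], 1)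

def Spec_support_box (cells : List ((Int × Int × Int × Int) × (Int × Int × Int))) (pad : Int) (out : List (Int × Int)) : Prop := out = support_box_alt cells pad
instance (cells : List ((Int × Int × Int × Int) × (Int × Int × Int))) (pad : Int) (out : List (Int × Int)) : Decidable (Spec_support_box cells pad out) := by unfold Spec_support_box; infer_instance

-- ===== CLAIM (what is proved, stated in full; the proofs are below) =====
def Claim_equal_support_box : Prop := ∀ (cells : List ((Int × Int × Int × Int) × (Int × Int × Int))) (pad : Int), Dom_support_box cells pad → Pre_support_box cells pad → Spec_support_box cells pad (support_box cells pad)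

-- ===== LEMMAS AND PROOFS =====

-- the combined one-pass fold computes the eight per-axis folds componentwise
theorem pvStep_foldl (rest : List ((Int × Int × Int × Int) × (Int × Int × Int)))
    (s : (Int × Int × Int × Int) × (Int × Int × Int × Int)) :
    rest.foldl pvStep s =
      ((rest.foldl (fun m c => min m c.1.1) s.1.1,
        rest.foldl (fun m c => min m c.1.2.1) s.1.2.1,
        rest.foldl (fun m c => min m c.1.2.2.1) s.1.2.2.1,
        rest.foldl (fun m c => min m c.1.2.2.2) s.1.2.2.2),
       (rest.foldl (fun m c => max m c.1.1) s.2.1,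
        rest.foldl (fun m c => max m c.1.2.1) s.2.2.1,
        rest.foldl (fun m c => max m c.1.2.2.1) s.2.2.2.1,
        rest.foldl (fun m c => max m c.1.2.2.2) s.2.2.2.2)) := by
  induction rest generalizing s with
  | nil => rfl
  | cons c rest ih => simp [List.foldl_cons, ih, pvStep]

-- ===== VERDICT (by name: the statement is the Claim_ definition above) =====
theorem support_box_spec : Claim_equal_support_box := by
  intro cells pad _ hpre
  cases cells with
  | nil => exact absurd rfl hpre
  | cons c rest =>
    show support_box (c :: rest) pad = support_box_alt (c :: rest) pad
    simp only [support_box, support_box_alt, pvStep_foldl, List.map_cons,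
      List.range_succ, List.foldl_append, List.foldl_cons, List.foldl_nil,
      List.min?_cons', List.max?_cons', Option.getD_some, List.foldl_map,
      List.range_zero, List.nil_append, pvAxisGet]
    simp
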